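-- pv_equiv track=rewrite | github.com/codepoet4/ACB_tracker | app/board_detector.py | flip_board_perspective
-- ===== SOURCE A (Python) =====
-- def flip_board_perspective(fen):
--     """
--     Flip the board perspective from white to black (or vice versa).
--     Reverses both rank order and file order within each rank.
--
--     Args:
--         fen: FEN string to flip
--
--     Returns:
--         Flipped FEN string
--     """
--     # Split FEN into board and metadata
--     parts = fen.split(' ')
--     board = parts[0]
--     metadata = ' '.join(parts[1:]) if len(parts) > 1 else 'w - - 0 1'
--
--     # Split board into ranks and reverse order
--     ranks = board.split('/')
--     ranks = ranks[::-1]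
--
--     # Reverse file order within each rank
--     flipped_ranks = [rank[::-1] for rank in ranks]
--
--     # Reconstruct FEN
--     flipped_board = '/'.join(flipped_ranks)
--     return f"{flipped_board} {metadata}"
-- ===== SOURCE B (Python) =====
-- def flip_board_perspective(fen):
--     """
--     Flip the board perspective from white to black (or vice versa).
--     Reversing the whole board string reverses the rank order and the file
--     order within each rank at once ('abc/def'[::-1] == 'fed/cba').
--     """
--     parts = fen.split(' ')
--     metadata = ' '.join(parts[1:]) if len(parts) > 1 else 'w - - 0 1'
--     return f"{parts[0][::-1]} {metadata}"
-- ===== Notes on version B (the rewrite author's own statement) =====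
-- stated objective: simpler
-- what changed: Replaces the split-on-'/'/reverse-ranks/reverse-each-rank/rejoin pipeline with a single reversal of the whole board string, which is provably the same operation.
import Mathlib
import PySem

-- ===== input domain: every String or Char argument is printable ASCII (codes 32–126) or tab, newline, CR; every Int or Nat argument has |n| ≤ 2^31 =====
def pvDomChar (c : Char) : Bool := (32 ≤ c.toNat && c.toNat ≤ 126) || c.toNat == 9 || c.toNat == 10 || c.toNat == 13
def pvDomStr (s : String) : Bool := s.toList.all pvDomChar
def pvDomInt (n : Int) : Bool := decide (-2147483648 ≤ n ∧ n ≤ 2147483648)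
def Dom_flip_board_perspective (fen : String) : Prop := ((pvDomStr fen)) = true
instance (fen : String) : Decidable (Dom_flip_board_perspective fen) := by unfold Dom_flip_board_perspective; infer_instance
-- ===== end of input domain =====

-- B replaces A's split-on-'/' / reverse ranks / reverse each rank / rejoin pipeline with one
-- reversal of the whole board string (simpler; same result, proved below).


-- ===== PORT A =====
-- parts[0]: str.split(' ') always returns a nonempty list, so Python's indexing cannot raise;
-- the .getD [] default is unreachable and the port is exact.
def flip_board_perspective (fen : String) : String :=
  let parts : List (List Char) := PySem.Chars.splitOn fen.toList [' ']
  let board : List Char := (PySem.List.pyGet? parts 0).getD []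
  let metadata : List Char :=
    if parts.length > 1 then PySem.Chars.join [' '] (PySem.List.slice parts (some 1) none)
    else "w - - 0 1".toList
  let ranks : List (List Char) := PySem.Chars.splitOn board ['/']
  let ranks' : List (List Char) := (PySem.List.slice? ranks none none (-1)).getD []
  let flipped_ranks : List (List Char) :=
    ranks'.map (fun rank => (PySem.List.slice? rank none none (-1)).getD [])
  let flipped_board : List Char := PySem.Chars.join ['/'] flipped_ranks
  String.ofList (flipped_board ++ ' ' :: metadata)

-- ===== PORT B =====
-- parts[0][::-1]: same remark, str.split(' ') is never empty.
def flip_board_perspective_alt (fen : String) : String :=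
  let parts : List (List Char) := PySem.Chars.splitOn fen.toList [' ']
  let metadata : List Char :=
    if parts.length > 1 then PySem.Chars.join [' '] (PySem.List.slice parts (some 1) none)
    else "w - - 0 1".toList
  let flipped_board : List Char :=
    (PySem.List.slice? ((PySem.List.pyGet? parts 0).getD []) none none (-1)).getD []
  String.ofList (flipped_board ++ ' ' :: metadata)

-- ===== PRECONDITION & SPEC =====
def Spec_flip_board_perspective (fen : String) (out : String) : Prop := out = flip_board_perspective_alt fen
instance (fen : String) (out : String) : Decidable (Spec_flip_board_perspective fen out) := by unfold Spec_flip_board_perspective; infer_instance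

-- ===== CLAIM (what is proved, stated in full; the proofs are below) =====
def Claim_equal_flip_board_perspective : Prop := ∀ (fen : String), Dom_flip_board_perspective fen → Spec_flip_board_perspective fen (flip_board_perspective fen)

-- ===== LEMMAS AND PROOFS =====

-- Reference form of board.split('/'): simple structural recursion.
def pvSplit1 : List Char → List (List Char)
  | [] => [[]]
  | c :: t =>
    if c = '/' then [] :: pvSplit1 t
    else
      match pvSplit1 t with
      | [] => [[c]]
      | h :: r => (c :: h) :: r

theorem pvSplit1_ne_nil (l : List Char) : pvSplit1 l ≠ [] := by
  cases l with
  | nil => simp [pvSplit1]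
  | cons c t =>
    simp only [pvSplit1]
    split
    · simp
    · split <;> simp

def pvConsHead (p : List Char) : List (List Char) → List (List Char)
  | [] => [p]
  | h :: r => (p ++ h) :: r

theorem pvGo_spec (fuel : Nat) (l cur : List Char) (acc : List (List Char)) (hfuel : l.length ≤ fuel) :
    PySem.Chars.splitOn.go ['/'] fuel l cur acc
      = acc.reverse ++ pvConsHead cur.reverse (pvSplit1 l) := by
  induction fuel generalizing l cur acc with
  | zero =>
    have hl : l = [] := by cases l <;> simp_all
    subst hl
    simp [PySem.Chars.splitOn.go, pvSplit1, pvConsHead]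
  | succ fuel ih =>
    cases l with
    | nil => simp [PySem.Chars.splitOn.go, pvSplit1, pvConsHead]
    | cons c rest =>
      by_cases hc : c = '/'
      · subst hc
        rw [show PySem.Chars.splitOn.go ['/'] (fuel + 1) ('/' :: rest) cur acc
              = PySem.Chars.splitOn.go ['/'] fuel (List.drop 1 ('/' :: rest)) [] (cur.reverse :: acc) by
            simp [PySem.Chars.splitOn.go, List.isPrefixOf]]
        rw [List.drop_one, List.tail_cons, ih rest [] (cur.reverse :: acc) (by simpa using Nat.le_of_succ_le_succ (by simpa using hfuel))]
        obtain ⟨h, r, hs⟩ : ∃ h r, pvSplit1 rest = h :: r := by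
          cases hsr : pvSplit1 rest with
          | nil => exact absurd hsr (pvSplit1_ne_nil rest)
          | cons h r => exact ⟨h, r, rfl⟩
        simp [pvSplit1, hs, pvConsHead]
      · rw [show PySem.Chars.splitOn.go ['/'] (fuel + 1) (c :: rest) cur acc
              = PySem.Chars.splitOn.go ['/'] fuel rest (c :: cur) acc by
            simp [PySem.Chars.splitOn.go, List.isPrefixOf, Ne.symm hc]]
        rw [ih rest (c :: cur) acc (by simpa using Nat.le_of_succ_le_succ (by simpa using hfuel))]
        obtain ⟨h, r, hs⟩ : ∃ h r, pvSplit1 rest = h :: r := by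
          cases hsr : pvSplit1 rest with
          | nil => exact absurd hsr (pvSplit1_ne_nil rest)
          | cons h r => exact ⟨h, r, rfl⟩
        simp [pvSplit1, hc, hs, pvConsHead]

theorem pvSplitOn_slash (b : List Char) : PySem.Chars.splitOn b ['/'] = pvSplit1 b := by
  unfold PySem.Chars.splitOn
  rw [pvGo_spec (b.length + 1) b [] [] (by omega)]
  obtain ⟨h, r, hs⟩ : ∃ h r, pvSplit1 b = h :: r := by
    cases hsr : pvSplit1 b with
    | nil => exact absurd hsr (pvSplit1_ne_nil b)
    | cons h r => exact ⟨h, r, rfl⟩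
  simp [hs, pvConsHead]

theorem pvJoin_snoc (sep : List Char) (xs : List (List Char)) (y : List Char) (h : xs ≠ []) :
    PySem.Chars.join sep (xs ++ [y]) = PySem.Chars.join sep xs ++ sep ++ y := by
  induction xs with
  | nil => exact absurd rfl h
  | cons a xs ih =>
    cases xs with
    | nil => simp [PySem.Chars.join, List.intercalate]
    | cons b xs =>
      have := ih (by simp)
      simp only [List.cons_append] at *
      rw [PySem.Chars.join_cons_cons, PySem.Chars.join_cons_cons, this]
      simp [List.append_assoc]

-- The crux: joining the reversed ranks, each reversed, is reversing the whole board string.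
theorem pvFlip_eq_reverse (b : List Char) :
    PySem.Chars.join ['/'] (((pvSplit1 b).reverse).map List.reverse) = b.reverse := by
  induction b with
  | nil => simp [pvSplit1, PySem.Chars.join, List.intercalate]
  | cons c t ih =>
    by_cases hc : c = '/'
    · subst hc
      have hne : ((pvSplit1 t).reverse).map List.reverse ≠ [] := by
        simp [pvSplit1_ne_nil t]
      have hsp : pvSplit1 ('/' :: t) = [] :: pvSplit1 t := by simp [pvSplit1]
      rw [hsp, List.reverse_cons, List.map_append]
      simp only [List.map_cons, List.map_nil, List.reverse_nil]
      rw [pvJoin_snoc _ _ _ hne, ih]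
      simp
    · obtain ⟨h, r, hs⟩ : ∃ h r, pvSplit1 t = h :: r := by
        cases hsr : pvSplit1 t with
        | nil => exact absurd hsr (pvSplit1_ne_nil t)
        | cons h r => exact ⟨h, r, rfl⟩
      rw [hs] at ih
      simp only [pvSplit1, if_neg hc, hs, List.reverse_cons, List.map_append, List.map_cons,
        List.map_nil] at *
      cases r with
      | nil =>
        simp only [List.reverse_nil, List.map_nil, List.nil_append] at *
        rw [PySem.Chars.join_singleton] at ih ⊢
        simp [ih]
      | cons r0 rs =>
        have hne : (List.map List.reverse ((r0 :: rs).reverse)) ≠ [] := by simp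
        rw [pvJoin_snoc _ _ _ hne] at ih ⊢
        rw [List.reverse_cons]
        conv_rhs => rw [← ih]
        simp [List.append_assoc]

-- ===== VERDICT (by name: the statement is the Claim_ definition above) =====
theorem flip_board_perspective_spec : Claim_equal_flip_board_perspective := by
  intro fen _
  unfold Spec_flip_board_perspective flip_board_perspective flip_board_perspective_alt
  simp only [PySem.List.slice?_none_none_neg_one, Option.getD_some, pvSplitOn_slash,
    pvFlip_eq_reverse]
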